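-- pv_equiv track=rewrite | github.com/cromox1/CodeWars | dominant_primes_Solve.py | solve5
-- ===== SOURCE A (Python) =====
-- def solve5(start,n):
--     prime = [True for i in range(n+1)]
--     p=2
--     while p*p <= n:
--         if prime[p]:
--             for i in range(p*2,n+1,p):
--                 prime[i]=False
--         p+=1
--     prime[0],prime[1]=False,False
--     total=0
--     position=0
--     for i in range(n+1):
--         if prime[i]:
--             position+=1
--             if prime[position] and i >=start:
--                 total+=i
--     return total
-- ===== SOURCE B (Python) =====
-- def solve5(start, n):
--     # no sieve: test each number (and each prime-index) by trial division
--     def is_prime(m):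
--         if m < 2:
--             return False
--         d = 2
--         while d * d <= m:
--             if m % d == 0:
--                 return False
--             d += 1
--         return True
--
--     total = 0
--     pos = 0
--     for i in range(2, n + 1):
--         if is_prime(i):
--             pos += 1
--             if is_prime(pos) and i >= start:
--                 total += i
--     return total
-- ===== Notes on version B (the rewrite author's own statement) =====
-- stated objective: alternative
-- what changed: Drops the Eratosthenes sieve array entirely: B decides primality of each candidate (and of its running prime-index) by direct trial division up to the square root, in one loop over 2..n with no precomputed table and no post-hoc prime[0]/prime[1] fix-up (which crashes A for n<1).
import Mathlib
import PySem

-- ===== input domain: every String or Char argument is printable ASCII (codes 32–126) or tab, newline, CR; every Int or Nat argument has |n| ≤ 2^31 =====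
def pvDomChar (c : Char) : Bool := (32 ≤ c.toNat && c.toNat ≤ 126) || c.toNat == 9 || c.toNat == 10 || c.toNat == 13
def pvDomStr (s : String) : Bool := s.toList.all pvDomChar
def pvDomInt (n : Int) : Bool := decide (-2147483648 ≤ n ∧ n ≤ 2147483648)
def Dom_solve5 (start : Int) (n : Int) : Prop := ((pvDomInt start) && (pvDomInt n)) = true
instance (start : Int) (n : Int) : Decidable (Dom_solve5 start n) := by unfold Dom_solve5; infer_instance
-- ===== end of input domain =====

-- B replaces A's Eratosthenes sieve array with direct trial division of each candidate
-- (and of its running prime index); objective: alternative algorithm, not faster.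
-- Port A keeps the sieve as an Array Bool (Python's list: O(1) read/write); on the admitted
-- inputs every index Python reads or writes is nonnegative and in range, so `.toNat` plus
-- `setIfInBounds`/`getD` is exact there.

-- ===== PORT A =====
-- termination measure fact cited by the recursive definitions below
theorem solve5_dec (n p : Int) (h : p * p ≤ n) : (n + 1 - (p + 1)).toNat < (n + 1 - p).toNat := by
  have hsq : 0 ≤ p * p := mul_self_nonneg p
  have hp : p ≤ p * p := by
    by_cases h0 : p ≤ 0
    · exact le_trans h0 hsq
    · calc p = p * 1 := (mul_one p).symm
        _ ≤ p * p := mul_le_mul_of_nonneg_left (by omega) (by omega)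
  have hpn : p ≤ n := le_trans hp h
  have h1 : n + 1 - (p + 1) = n - p := by ring
  have h2 : n + 1 - p = n - p + 1 := by ring
  have h3 : (0:Int) ≤ n - p := sub_nonneg.mpr hpn
  rw [h1, h2]
  refine (Int.toNat_lt_toNat ?_).mpr (lt_add_one _)
  exact add_pos_of_nonneg_of_pos h3 one_pos

-- the `while p*p <= n` sieve loop of A
def solve5_sieveA (n : Int) (p : Int) (prime : Array Bool) : Array Bool :=
  if _h : p * p ≤ n then
    solve5_sieveA n (p + 1)
      (if prime.getD p.toNat false then
        (PySem.List.pyRange (p * 2) (n + 1) p).foldl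
          (fun pr i => pr.setIfInBounds i.toNat false) prime
      else prime)
  else prime
termination_by (n + 1 - p).toNat
decreasing_by exact solve5_dec n p _h

-- prime = [True for i in range(n+1)]; the sieve; then prime[0],prime[1] = False, False
-- (that assignment is Python's IndexError when n < 1; Pre_ excludes that)
def solve5_arr (n : Int) : Array Bool :=
  ((solve5_sieveA n 2 (((PySem.List.pyRange 0 (n + 1) 1).map (fun _ => true)).toArray)).setIfInBounds 0 false).setIfInBounds 1 false

def solve5 (start : Int) (n : Int) : Int :=
  -- total=0; position=0; for i in range(n+1): …   (prime[i] and prime[position] always in range under Pre_)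
  ((PySem.List.pyRange 0 (n + 1) 1).foldl
    (fun (s : Int × Int) i =>
      if (solve5_arr n).getD i.toNat false then
        (if (solve5_arr n).getD (s.2 + 1).toNat false && decide (start ≤ i) then s.1 + i else s.1,
         s.2 + 1)
      else s)
    (0, 0)).1

-- ===== PORT B =====
-- the `while d*d <= m` trial-division loop of B's is_prime
def solve5_trial (m : Int) (d : Int) : Bool :=
  if _h : d * d ≤ m then
    if PySem.Int.mod m d == 0 then false else solve5_trial m (d + 1)
  else true
termination_by (m + 1 - d).toNat
decreasing_by exact solve5_dec m d _h

def solve5_isPrime (m : Int) : Bool :=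
  if m < 2 then false else solve5_trial m 2

def solve5_alt (start : Int) (n : Int) : Int :=
  -- total=0; pos=0; for i in range(2, n+1): if is_prime(i): pos += 1; if is_prime(pos) and i >= start: total += i
  ((PySem.List.pyRange 2 (n + 1) 1).foldl
    (fun (s : Int × Int) i =>
      if solve5_isPrime i then
        (if solve5_isPrime (s.2 + 1) && decide (start ≤ i) then s.1 + i else s.1,
         s.2 + 1)
      else s)
    (0, 0)).1

-- ===== PRECONDITION & SPEC =====
-- Pre_ excludes exactly n ≤ 0, where Python A raises IndexError on prime[0],prime[1]=False,False
def Pre_solve5 (start : Int) (n : Int) : Prop := 1 ≤ n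
instance (start : Int) (n : Int) : Decidable (Pre_solve5 start n) := by unfold Pre_solve5; infer_instance
def pvWitness_solve5 : Int × Int := (0, 10)

def Spec_solve5 (start : Int) (n : Int) (out : Int) : Prop := out = solve5_alt start n
instance (start : Int) (n : Int) (out : Int) : Decidable (Spec_solve5 start n out) := by unfold Spec_solve5; infer_instance

-- ===== CLAIM (what is proved, stated in full; the proofs are below) =====
def Claim_equal_solve5 : Prop := ∀ (start : Int) (n : Int), Dom_solve5 start n → Pre_solve5 start n → Spec_solve5 start n (solve5 start n)

-- ===== LEMMAS AND PROOFS =====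


theorem solve5_bool_eq_of_iff {a b : Bool} (h : a = true ↔ b = true) : a = b := by
  cases a <;> cases b <;> simp_all

theorem solve5_factor_ge_two (d e k : Int) (hd : 2 ≤ d) (hk : 2 ≤ k)
    (hke : k = d * e) (hne : d ≠ k) : 2 ≤ e := by
  by_cases h1 : e ≤ 0
  · nlinarith
  · by_cases h2 : e = 1
    · subst h2
      simp at hke
      omega
    · omega

-- `k has a proper divisor ≥ 2` — the complement of primality for k ≥ 2
def solve5_HasFac (k : Int) : Prop := ∃ d, 2 ≤ d ∧ d ∣ k ∧ d ≠ k

-- `k already marked by some sieve prime below p`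
def solve5_MarkedB (p k : Int) : Prop := ∃ d, 2 ≤ d ∧ d < p ∧ d ∣ k ∧ d ≠ k

theorem solve5_small_fac (k : Int) (hk : 2 ≤ k) :
    solve5_HasFac k ↔ ∃ d, 2 ≤ d ∧ d * d ≤ k ∧ d ∣ k := by
  constructor
  · rintro ⟨d, hd2, ⟨e, hke⟩, hdk⟩
    have hd0 : 0 < d := by omega
    have he2 : 2 ≤ e := solve5_factor_ge_two d e k hd2 hk hke hdk
    by_cases h : d * d ≤ k
    · exact ⟨d, hd2, h, ⟨e, hke⟩⟩
    · refine ⟨e, he2, ?_, ⟨d, by rw [hke]; ring⟩⟩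
      nlinarith
  · rintro ⟨d, hd2, hdd, hdvd⟩
    refine ⟨d, hd2, hdvd, ?_⟩
    intro h; subst h; nlinarith

theorem solve5_trial_iff (m : Int) (d : Int) (hd : 1 ≤ d) :
    solve5_trial m d = true ↔ ∀ e, d ≤ e → e * e ≤ m → ¬ e ∣ m := by
  rw [solve5_trial]
  by_cases h : d * d ≤ m
  · rw [dif_pos h]
    by_cases hmod : PySem.Int.mod m d == 0
    · rw [if_pos hmod]
      have hdvd : d ∣ m := (PySem.Int.mod_eq_zero_iff_dvd m d).mp (by simpa using hmod)
      constructor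
      · intro hfalse; exact absurd hfalse (by simp)
      · intro hall; exact absurd (hall d le_rfl h) (by simp [hdvd])
    · rw [if_neg hmod]
      rw [solve5_trial_iff m (d + 1) (by omega)]
      constructor
      · intro hall e hde hee
        rcases eq_or_lt_of_le hde with h1 | h1
        · intro hdvd
          apply hmod
          have hdm' : d ∣ m := by rw [h1]; exact hdvd
          simpa using (PySem.Int.mod_eq_zero_iff_dvd m d).mpr hdm'
        · exact hall e (by omega) hee
      · intro hall e hde hee
        exact hall e (by omega) hee
  · rw [dif_neg h]
    constructor
    · intro _ e hde hee hdvd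
      apply h
      calc d * d ≤ e * e := by nlinarith
        _ ≤ m := hee
    · intro _; rfl
termination_by (m + 1 - d).toNat
decreasing_by exact solve5_dec m d h

theorem solve5_isPrime_iff (k : Int) :
    solve5_isPrime k = true ↔ (2 ≤ k ∧ ¬ solve5_HasFac k) := by
  unfold solve5_isPrime
  by_cases hk : k < 2
  · simp only [hk, if_true]
    constructor
    · intro h; exact absurd h (by simp)
    · intro ⟨h, _⟩; omega
  · rw [if_neg hk]
    have hk2 : 2 ≤ k := by omega
    rw [solve5_trial_iff k 2 (by omega), solve5_small_fac k hk2]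
    constructor
    · intro hall
      refine ⟨hk2, ?_⟩
      rintro ⟨d, hd2, hdd, hdvd⟩
      exact hall d hd2 hdd hdvd
    · rintro ⟨_, hno⟩ e he2 hee hdvd
      exact hno ⟨e, he2, hee, hdvd⟩

theorem solve5_size_mark_fold (r : List Int) (l : Array Bool) :
    (r.foldl (fun pr i => pr.setIfInBounds i.toNat false) l).size = l.size := by
  induction r generalizing l with
  | nil => rfl
  | cons x r ih => simp [List.foldl_cons, ih, Array.size_setIfInBounds]

theorem solve5_size_sieveA (n p : Int) (l : Array Bool) :
    (solve5_sieveA n p l).size = l.size := by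
  fun_induction solve5_sieveA n p l with
  | case1 p l h ih =>
      simp only [dite_eq_ite] at ih
      rw [ih]
      split <;> simp [solve5_size_mark_fold]
  | case2 => rfl

theorem solve5_fold_set_getD (r : List Int) (arr : Array Bool) (k : Nat)
    (hr : ∀ i ∈ r, 0 ≤ i) (hk : k < arr.size) :
    (r.foldl (fun pr i => pr.setIfInBounds i.toNat false) arr).getD k false
      = if (k : Int) ∈ r then false else arr.getD k false := by
  induction r generalizing arr with
  | nil => simp
  | cons x r ih =>
      have hx : 0 ≤ x := hr x (by simp)
      rw [List.foldl_cons, ih _ (fun i hi => hr i (by simp [hi])) (by simp [Array.size_setIfInBounds, hk])]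
      by_cases hmem : (k : Int) ∈ r
      · simp [hmem]
      · rw [if_neg hmem]
        by_cases hkx : (k : Int) = x
        · have hkx' : x.toNat = k := by omega
          rw [if_pos (by simp [hkx]), Array.getD_eq_getD_getElem?, Array.getElem?_setIfInBounds, hkx']
          simp [hk]
        · rw [if_neg (by simp [hkx, hmem]), Array.getD_eq_getD_getElem?, Array.getD_eq_getD_getElem?,
              Array.getElem?_setIfInBounds]
          rw [if_neg (by omega)]

theorem solve5_sieve_char (n : Int) (p : Int) (hp : 2 ≤ p) (arr : Array Bool)
    (hsz : arr.size = (n + 1).toNat)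
    (hinv : ∀ k : Int, 2 ≤ k → k ≤ n → (arr.getD k.toNat false = true ↔ ¬ solve5_MarkedB p k)) :
    ∀ k : Int, 2 ≤ k → k ≤ n →
      ((solve5_sieveA n p arr).getD k.toNat false = true ↔ ¬ solve5_HasFac k) := by
  rw [solve5_sieveA]
  by_cases h : p * p ≤ n
  · rw [dif_pos h]
    have hpn : p ≤ n := by nlinarith
    by_cases hc : arr.getD p.toNat false = true
    · rw [if_pos hc]
      refine solve5_sieve_char n (p + 1) (by omega) _ ?_ ?_
      · rw [solve5_size_mark_fold, hsz]
      · intro k hk2 hkn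
        have hkn' : (k.toNat : Int) = k := by omega
        rw [solve5_fold_set_getD _ _ _ ?hr (by omega)]
        case hr =>
          intro i hi
          have := (PySem.List.mem_pyRange_iff_of_pos (by omega : (0:Int) < p) i).mp hi
          omega
        have hmem : ((k.toNat : Int) ∈ PySem.List.pyRange (p * 2) (n + 1) p) ↔ (p ∣ k ∧ p ≠ k) := by
          rw [PySem.List.mem_pyRange_iff_of_pos (by omega : (0:Int) < p), hkn']
          constructor
          · rintro ⟨h1, h2, h3⟩
            have hp2 : p ∣ p * 2 := ⟨2, rfl⟩
            have hpk' : p ∣ k := by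
              have h4 := dvd_add h3 hp2
              simpa using h4
            exact ⟨hpk', by omega⟩
          · rintro ⟨⟨e, hke⟩, hne⟩
            have he2 : 2 ≤ e := solve5_factor_ge_two p e k hp (by omega) hke hne
            have hsub : k - p * 2 = p * (e - 2) := by rw [hke]; ring
            exact ⟨by nlinarith, by omega, ⟨e - 2, hsub⟩⟩
        have hmarked : solve5_MarkedB (p + 1) k ↔ (solve5_MarkedB p k ∨ (p ∣ k ∧ p ≠ k)) := by
          constructor
          · rintro ⟨d, hd2, hdp, hdvd, hdk⟩
            by_cases h' : d < p
            · exact Or.inl ⟨d, hd2, h', hdvd, hdk⟩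
            · have : d = p := by omega
              subst this
              exact Or.inr ⟨hdvd, hdk⟩
          · rintro (⟨d, hd2, hdp, hdvd, hdk⟩ | ⟨hdvd, hdk⟩)
            · exact ⟨d, hd2, by omega, hdvd, hdk⟩
            · exact ⟨p, hp, by omega, hdvd, hdk⟩
        by_cases hm : (k.toNat : Int) ∈ PySem.List.pyRange (p * 2) (n + 1) p
        · rw [if_pos hm]
          simp only [false_iff] at *
          rw [hmarked]
          simp [hmem.mp hm]
        · rw [if_neg hm, hinv k hk2 hkn, hmarked]
          rw [hmem] at hm
          constructor
          · intro hnm hor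
            rcases hor with h' | h'
            · exact hnm h'
            · exact hm h'
          · intro hnm hmk
            exact hnm (Or.inl hmk)
    · rw [if_neg hc]
      have hmp : solve5_MarkedB p p := by
        by_contra hno
        exact hc ((hinv p hp hpn).mpr hno)
      refine solve5_sieve_char n (p + 1) (by omega) arr hsz ?_
      intro k hk2 hkn
      rw [hinv k hk2 hkn]
      have : solve5_MarkedB (p + 1) k ↔ solve5_MarkedB p k := by
        constructor
        · rintro ⟨d, hd2, hdp, hdvd, hdk⟩
          by_cases h' : d < p
          · exact ⟨d, hd2, h', hdvd, hdk⟩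
          · have hdp' : d = p := by omega
            subst hdp'
            obtain ⟨d', hd'2, hd'p, hd'dvd, hd'ne⟩ := hmp
            have hdk' : d ∣ k := hdvd
            have hdlek : d ≤ k := Int.le_of_dvd (by omega) hdk'
            exact ⟨d', hd'2, hd'p, hd'dvd.trans hdvd, by omega⟩
        · rintro ⟨d, hd2, hdp, hdvd, hdk⟩
          exact ⟨d, hd2, by omega, hdvd, hdk⟩
      rw [this]
  · rw [dif_neg h]
    intro k hk2 hkn
    rw [hinv k hk2 hkn]
    have : solve5_MarkedB p k ↔ solve5_HasFac k := by
      constructor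
      · rintro ⟨d, hd2, _, hdvd, hdk⟩
        exact ⟨d, hd2, hdvd, hdk⟩
      · intro hf
        obtain ⟨d, hd2, hdd, hdvd⟩ := (solve5_small_fac k hk2).mp hf
        refine ⟨d, hd2, ?_, hdvd, ?_⟩
        · nlinarith
        · intro h'; subst h'; nlinarith
    rw [this]
termination_by (n + 1 - p).toNat
decreasing_by all_goals exact solve5_dec n p h

-- the two loop bodies agree once the (fixed) sieve array reads as solve5_isPrime on 0..n
theorem solve5_fold_agree (start n : Int) (A_ : Array Bool)
    (hb : ∀ k : Int, 0 ≤ k → k ≤ n → A_.getD k.toNat false = solve5_isPrime k) :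
    ∀ (l : List Int), (∀ i ∈ l, 2 ≤ i ∧ i ≤ n) → ∀ (t pos : Int), 0 ≤ pos →
      pos + (l.countP (fun i => solve5_isPrime i) : Int) ≤ n - 1 →
      (l.foldl
        (fun (s : Int × Int) i =>
          if A_.getD i.toNat false then
            (if A_.getD (s.2 + 1).toNat false && decide (start ≤ i) then s.1 + i else s.1,
             s.2 + 1)
          else s) (t, pos))
      = (l.foldl
          (fun (s : Int × Int) i =>
            if solve5_isPrime i then
              (if solve5_isPrime (s.2 + 1) && decide (start ≤ i) then s.1 + i else s.1,
               s.2 + 1)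
            else s) (t, pos)) := by
  intro l
  induction l with
  | nil => intro _ t pos _ _; rfl
  | cons i l ih =>
      intro hmem t pos hpos hcnt
      obtain ⟨hi2, hin⟩ := hmem i (by simp)
      have hAi : A_.getD i.toNat false = solve5_isPrime i := hb i (by omega) hin
      simp only [List.foldl_cons, List.countP_cons] at *
      by_cases hp : solve5_isPrime i = true
      · have hcnt1 : pos + 1 ≤ n := by
          simp only [hp, decide_true, if_pos] at hcnt
          push_cast at hcnt
          have : (0:Int) ≤ (l.countP (fun i => solve5_isPrime i) : Int) := by positivity
          omega
        rw [hAi, hp, if_pos rfl, if_pos rfl,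
            hb (pos + 1) (by omega) hcnt1]
        refine ih (fun j hj => hmem j (by simp [hj])) _ _ (by omega) ?_
        simp only [hp, decide_true, if_pos] at hcnt
        push_cast at hcnt ⊢
        omega
      · rw [hAi, if_neg hp, if_neg hp]
        refine ih (fun j hj => hmem j (by simp [hj])) _ _ hpos ?_
        simp only [hp, decide_false] at hcnt
        push_cast at hcnt ⊢
        simp at hcnt
        omega

-- A's array (sieve + 0/1 fix-up) reads exactly as B's trial-division test on 0..n
theorem solve5_bridge (n : Int) (hn : 1 ≤ n) :
    ∀ k : Int, 0 ≤ k → k ≤ n →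
      (solve5_arr n).getD k.toNat false = solve5_isPrime k := by
  intro k hk0 hkn
  unfold solve5_arr
  have hsz0 : (((PySem.List.pyRange 0 (n + 1) 1).map (fun _ : Int => true)).toArray).size = (n + 1).toNat := by
    simp [PySem.List.length_pyRange_one]
  have hszs : (solve5_sieveA n 2 (((PySem.List.pyRange 0 (n + 1) 1).map (fun _ : Int => true)).toArray)).size = (n + 1).toNat := by
    rw [solve5_size_sieveA, hsz0]
  by_cases hk2 : 2 ≤ k
  · have hchar := solve5_sieve_char n 2 le_rfl _ hsz0 ?hinv k hk2 hkn
    case hinv =>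
      intro m hm2 hmn
      have hget : (((PySem.List.pyRange 0 (n + 1) 1).map (fun _ : Int => true)).toArray).getD m.toNat false = true := by
        rw [Array.getD_eq_getD_getElem?]
        simp only [List.getElem?_toArray, List.getElem?_map, PySem.List.getElem?_pyRange_one]
        rw [if_pos (by omega)]
        rfl
      rw [hget]
      simp only [true_iff]
      rintro ⟨d, hd2, hdp, _, _⟩
      omega
    have hfix : (((solve5_sieveA n 2 (((PySem.List.pyRange 0 (n + 1) 1).map (fun _ : Int => true)).toArray)).setIfInBounds 0 false).setIfInBounds 1 false).getD k.toNat false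
        = (solve5_sieveA n 2 (((PySem.List.pyRange 0 (n + 1) 1).map (fun _ : Int => true)).toArray)).getD k.toNat false := by
      rw [Array.getD_eq_getD_getElem?, Array.getD_eq_getD_getElem?,
          Array.getElem?_setIfInBounds, if_neg (by omega),
          Array.getElem?_setIfInBounds, if_neg (by omega)]
    rw [hfix]
    have hiff := solve5_isPrime_iff k
    exact solve5_bool_eq_of_iff
      ⟨fun h' => hiff.mpr ⟨hk2, hchar.mp h'⟩, fun h' => hchar.mpr (hiff.mp h').2⟩
  · have hkval : k = 0 ∨ k = 1 := by omega
    have hprime : solve5_isPrime k = false := by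
      unfold solve5_isPrime
      rw [if_pos (by omega)]
    rw [hprime]
    rcases hkval with h | h <;> subst h
    · rw [Array.getD_eq_getD_getElem?, Array.getElem?_setIfInBounds, if_neg (by omega),
          Array.getElem?_setIfInBounds, if_pos (by omega), if_pos (by rw [hszs]; omega)]
      rfl
    · rw [Array.getD_eq_getD_getElem?, Array.getElem?_setIfInBounds, if_pos (by omega),
          if_pos (by rw [Array.size_setIfInBounds, hszs]; omega)]
      rfl

-- ===== VERDICT (by name: the statement is the Claim_ definition above) =====
theorem solve5_spec : Claim_equal_solve5 := by
  intro start n _ hn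
  have hn1 : (1:Int) ≤ n := hn
  unfold Spec_solve5 solve5 solve5_alt
  have hb := solve5_bridge n hn1
  rw [PySem.List.pyRange_one_cons (by omega : (0:Int) < n + 1)]
  have h01 : (0:Int) + 1 = 1 := by norm_num
  rw [h01, PySem.List.pyRange_one_cons (by omega : (1:Int) < n + 1)]
  have h12 : (1:Int) + 1 = 2 := by norm_num
  rw [h12]
  simp only [List.foldl_cons]
  rw [hb 0 le_rfl (by omega), hb 1 (by omega) (by omega)]
  have hp0 : solve5_isPrime 0 = false := by unfold solve5_isPrime; rw [if_pos (by omega)]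
  have hp1 : solve5_isPrime 1 = false := by unfold solve5_isPrime; rw [if_pos (by omega)]
  rw [hp0, hp1]
  simp only [Bool.false_eq_true, if_false]
  rw [solve5_fold_agree start n _ hb (PySem.List.pyRange 2 (n + 1) 1) ?hmem 0 0 le_rfl ?hcnt]
  case hmem =>
    intro i hi
    have := (PySem.List.mem_pyRange_one).mp hi
    omega
  case hcnt =>
    have hle : ((PySem.List.pyRange 2 (n + 1) 1).countP (fun i => solve5_isPrime i)) ≤ (PySem.List.pyRange 2 (n + 1) 1).length :=
      List.countP_le_length
    rw [PySem.List.length_pyRange_one] at hle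
    have : ((n + 1 - 2).toNat : Int) = n - 1 := by omega
    omega
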